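-- pv_equiv track=rewrite | github.com/guapisolo/miles | miles/utils/chat_template_utils/tito_tokenizer.py | _split_appended_segments
-- ===== SOURCE A (Python) =====
-- from typing import Any
--
-- def _split_appended_segments(appended_messages: list[dict[str, Any]]) -> list[list[dict[str, Any]]]:
--     segments: list[list[dict[str, Any]]] = []
--     i = 0
--     while i < len(appended_messages):
--         role = appended_messages[i]["role"]
--         # Many templates wrap a contiguous tool-response run as one logical
--         # block, so tool messages are diffed together instead of one-by-one.
--         if role == "tool":
--             j = i + 1
--             while j < len(appended_messages) and appended_messages[j]["role"] == "tool":
--                 j += 1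
--             segments.append(appended_messages[i:j])
--             i = j
--             continue
--         if role in {"user", "system"}:
--             segments.append([appended_messages[i]])
--             i += 1
--             continue
--         raise ValueError(f"unsupported appended role for TITO segmentation: {role}")
--
--     return segments
-- ===== SOURCE B (Python) =====
-- from typing import Any
--
-- def _split_appended_segments(appended_messages: list[dict[str, Any]]) -> list[list[dict[str, Any]]]:
--     # Build the segment list back-to-front: fold over the messages in reverse,
--     # deciding per message whether to merge into the current head segment.
--     segments: list[list[dict[str, Any]]] = []
--     for msg in reversed(appended_messages):
--         role = msg["role"]
--         if role == "tool":
--             if segments and segments[0][0]["role"] == "tool":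
--                 segments[0].insert(0, msg)
--             else:
--                 segments.insert(0, [msg])
--         elif role in ("user", "system"):
--             segments.insert(0, [msg])
--         else:
--             raise ValueError(f"unsupported appended role for TITO segmentation: {role}")
--     return segments
-- ===== Notes on version B (the rewrite author's own statement) =====
-- stated objective: alternative
-- what changed: Replaces A's forward index walk with an inner run-scanning while loop by a single reverse fold that never scans runs: each message either merges into the accumulator's head segment (tool onto tool) or starts a new head segment.
import Mathlib
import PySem

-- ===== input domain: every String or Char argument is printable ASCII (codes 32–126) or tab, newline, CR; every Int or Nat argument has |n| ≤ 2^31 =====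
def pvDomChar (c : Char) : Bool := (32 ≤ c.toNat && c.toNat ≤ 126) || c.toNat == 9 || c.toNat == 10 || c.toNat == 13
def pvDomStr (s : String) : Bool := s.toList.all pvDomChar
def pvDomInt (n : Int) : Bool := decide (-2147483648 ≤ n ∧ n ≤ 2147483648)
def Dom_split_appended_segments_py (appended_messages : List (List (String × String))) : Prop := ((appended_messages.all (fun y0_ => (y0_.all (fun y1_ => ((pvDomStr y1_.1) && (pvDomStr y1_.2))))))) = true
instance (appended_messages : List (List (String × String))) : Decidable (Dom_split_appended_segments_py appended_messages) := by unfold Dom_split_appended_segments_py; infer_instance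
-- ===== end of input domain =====

-- B replaces A's forward index walk (with its inner run-scanning while loop) by a
-- single reverse fold that merges each tool message into the accumulator's head
-- segment; Pre_ excludes inputs where A raises (missing "role" key or a role
-- outside {tool,user,system}).


-- m["role"]: first-match lookup in the association list (total form; missing key
-- gives "", which Pre_ excludes since A raises KeyError there)
def pvRole (m : List (String × String)) : String :=
  ((m.find? (fun p => p.1 == "role")).map Prod.snd).getD ""

-- ===== PORT A =====
-- inner while loop of A: collect the run of "tool" messages and the remainder
def toolRunA : List (List (String × String)) → List (List (String × String)) × List (List (String × String))
  | [] => ([], [])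
  | x :: xs =>
    if pvRole x == "tool" then
      let p := toolRunA xs
      (x :: p.1, p.2)
    else ([], x :: xs)

theorem toolRunA_snd_le : ∀ l : List (List (String × String)), (toolRunA l).2.length ≤ l.length := by
  intro l
  induction l with
  | nil => simp [toolRunA]
  | cons x xs ih =>
    simp only [toolRunA]
    split
    · simpa using Nat.le_succ_of_le ih
    · simp

def split_appended_segments_py (appended_messages : List (List (String × String))) : List (List (List (String × String))) :=
  match appended_messages with
  | [] => []
  | m :: rest =>
    if pvRole m == "tool" then
      let p := toolRunA rest
      (m :: p.1) :: split_appended_segments_py p.2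
    else if pvRole m == "user" || pvRole m == "system" then
      [m] :: split_appended_segments_py rest
    else []  -- raise ValueError: unreachable under Pre_
termination_by appended_messages.length
decreasing_by
  · exact Nat.lt_succ_of_le (toolRunA_snd_le rest)
  · simp

-- ===== PORT B =====
-- the body of B's reversed loop: one message applied to the current segment list
def altStep (m : List (String × String)) (segs : List (List (List (String × String)))) :
    List (List (List (String × String))) :=
  if pvRole m == "tool" then
    match segs with
    | (x :: s) :: t => if pvRole x == "tool" then (m :: x :: s) :: t else [m] :: (x :: s) :: t
    | _ => [m] :: segs
  else if pvRole m == "user" || pvRole m == "system" then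
    [m] :: segs
  else []  -- raise ValueError: unreachable under Pre_

-- 'for msg in reversed(...)' prepending to segments = a right fold
def split_appended_segments_py_alt (appended_messages : List (List (String × String))) : List (List (List (String × String))) :=
  appended_messages.foldr altStep []

-- ===== PRECONDITION & SPEC =====
-- Pre_ excludes exactly the inputs on which A raises: a message without a "role"
-- key (KeyError; then pvRole = "") or with a role outside {tool,user,system} (ValueError).
def Pre_split_appended_segments_py (appended_messages : List (List (String × String))) : Prop :=
  (appended_messages.all (fun m => pvRole m == "tool" || pvRole m == "user" || pvRole m == "system")) = true
instance (appended_messages : List (List (String × String))) : Decidable (Pre_split_appended_segments_py appended_messages) := by unfold Pre_split_appended_segments_py; infer_instance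

def pvWitness_split_appended_segments_py : (List (List (String × String))) :=
  [[("role", "user"), ("content", "hi")], [("role", "tool"), ("content", "42")], [("role", "tool"), ("content", "ok")]]

def Spec_split_appended_segments_py (appended_messages : List (List (String × String))) (out : List (List (List (String × String)))) : Prop := out = split_appended_segments_py_alt appended_messages
instance (appended_messages : List (List (String × String))) (out : List (List (List (String × String)))) : Decidable (Spec_split_appended_segments_py appended_messages out) := by unfold Spec_split_appended_segments_py; infer_instance

-- ===== CLAIM (what is proved, stated in full; the proofs are below) =====
def Claim_equal_split_appended_segments_py : Prop := ∀ (appended_messages : List (List (String × String))), Dom_split_appended_segments_py appended_messages → Pre_split_appended_segments_py appended_messages → Spec_split_appended_segments_py appended_messages (split_appended_segments_py appended_messages)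

-- ===== LEMMAS AND PROOFS =====

theorem toolRunA_split (l : List (List (String × String))) :
    l = (toolRunA l).1 ++ (toolRunA l).2 := by
  induction l with
  | nil => rfl
  | cons x xs ih =>
    simp only [toolRunA]
    split
    · simpa using ih
    · rfl

theorem toolRunA_fst_tool (l : List (List (String × String))) :
    ∀ x ∈ (toolRunA l).1, pvRole x = "tool" := by
  induction l with
  | nil => simp [toolRunA]
  | cons x xs ih =>
    simp only [toolRunA]
    split
    · rename_i hx
      intro y hy
      rcases (by simpa using hy : y = x ∨ y ∈ (toolRunA xs).1) with h | h
      · subst h; exact beq_iff_eq.mp hx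
      · exact ih y h
    · simp

theorem toolRunA_snd_head (l : List (List (String × String))) :
    (toolRunA l).2 = [] ∨ ∃ h t, (toolRunA l).2 = h :: t ∧ (pvRole h == "tool") = false := by
  induction l with
  | nil => exact Or.inl rfl
  | cons x xs ih =>
    simp only [toolRunA]
    split
    · exact ih
    · rename_i hx
      exact Or.inr ⟨x, xs, rfl, by simpa using hx⟩

theorem altStep_tool_merge (m x : List (String × String)) (s : List (List (String × String)))
    (t : List (List (List (String × String))))
    (hm : pvRole m = "tool") (hx : pvRole x = "tool") :
    altStep m ((x :: s) :: t) = (m :: x :: s) :: t := by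
  simp [altStep, hm, hx]

theorem altStep_tool_new (m : List (String × String)) (segs : List (List (List (String × String))))
    (hm : pvRole m = "tool")
    (h : segs = [] ∨ ∃ x s t, segs = (x :: s) :: t ∧ (pvRole x == "tool") = false) :
    altStep m segs = [m] :: segs := by
  rcases h with h0 | ⟨x, s, t, heq, hx⟩
  · subst h0; simp [altStep, hm]
  · subst heq; simp [altStep, hm, hx]

theorem altStep_us (m : List (String × String)) (segs : List (List (List (String × String))))
    (hm : pvRole m = "user" ∨ pvRole m = "system") :
    altStep m segs = [m] :: segs := by
  have hnt : (pvRole m == "tool") = false := by rcases hm with h | h <;> simp [h]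
  have hus : (pvRole m == "user" || pvRole m == "system") = true := by
    rcases hm with h | h <;> simp [h]
  simp [altStep, hnt, hus]

-- B's fold on a nonempty good-role list produces a head segment headed by the first message
theorem alt_head (m : List (String × String)) (rest : List (List (String × String)))
    (hm : (pvRole m == "tool" || pvRole m == "user" || pvRole m == "system") = true) :
    ∃ s t, (m :: rest).foldr altStep [] = (m :: s) :: t := by
  rw [List.foldr_cons]
  generalize rest.foldr altStep [] = segs
  rcases Bool.or_eq_true .. |>.mp hm with h | hsys
  · rcases Bool.or_eq_true .. |>.mp h with ht | hu
    · have hm' := beq_iff_eq.mp ht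
      rcases segs with _ | ⟨_ | ⟨x, s⟩, t⟩
      · exact ⟨[], [], altStep_tool_new m [] hm' (Or.inl rfl)⟩
      · exact ⟨[], [] :: t, by simp [altStep, hm']⟩
      · by_cases hx : (pvRole x == "tool") = true
        · exact ⟨x :: s, t, altStep_tool_merge m x s t hm' (beq_iff_eq.mp hx)⟩
        · exact ⟨[], _, altStep_tool_new m _ hm' (Or.inr ⟨x, s, t, rfl, by simpa using hx⟩)⟩
    · exact ⟨[], segs, altStep_us m segs (Or.inl (beq_iff_eq.mp hu))⟩
  · exact ⟨[], segs, altStep_us m segs (Or.inr (beq_iff_eq.mp hsys))⟩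

-- folding a nonempty all-tool run onto a list whose fold is empty or headed by a
-- non-tool message simply prepends the run as one segment
theorem alt_tool_run (run l : List (List (String × String)))
    (hrun : ∀ x ∈ run, pvRole x = "tool") (hne : run ≠ [])
    (hl : l.foldr altStep [] = [] ∨
      ∃ x s t, l.foldr altStep [] = (x :: s) :: t ∧ (pvRole x == "tool") = false) :
    (run ++ l).foldr altStep [] = run :: l.foldr altStep [] := by
  induction run with
  | nil => exact absurd rfl hne
  | cons a rs ih =>
    have ha : pvRole a = "tool" := hrun a (by simp)
    cases rs with
    | nil =>
      simp only [List.cons_append, List.nil_append, List.foldr_cons]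
      exact altStep_tool_new a _ ha hl
    | cons b rs' =>
      have hih := ih (fun x hx => hrun x (by simp [hx])) (by simp)
      simp only [List.cons_append, List.foldr_cons] at hih ⊢
      rw [hih]
      exact altStep_tool_merge a b rs' _ ha (hrun b (by simp))

theorem main_equiv : ∀ (n : Nat) (ms : List (List (String × String))), ms.length ≤ n →
    Pre_split_appended_segments_py ms →
    split_appended_segments_py ms = split_appended_segments_py_alt ms := by
  intro n
  induction n with
  | zero =>
    intro ms hlen _
    have : ms = [] := List.eq_nil_of_length_eq_zero (Nat.le_zero.mp hlen)
    subst this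
    rw [split_appended_segments_py]; rfl
  | succ n ih =>
    intro ms hlen hpre
    cases ms with
    | nil => rw [split_appended_segments_py]; rfl
    | cons m rest =>
      have hpre' : ∀ x ∈ (m :: rest),
          (pvRole x == "tool" || pvRole x == "user" || pvRole x == "system") = true := by
        simpa [Pre_split_appended_segments_py, List.all_eq_true] using hpre
      have hrest_le : rest.length ≤ n := Nat.le_of_succ_le_succ hlen
      have preOf : ∀ l : List (List (String × String)), l.Sublist (m :: rest) →
          Pre_split_appended_segments_py l := by
        intro l hsub
        simp only [Pre_split_appended_segments_py, List.all_eq_true]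
        intro x hx
        exact hpre' x (hsub.mem hx)
      have hm := hpre' m (by simp)
      by_cases htool : (pvRole m == "tool") = true
      · -- tool case: A takes the run in one chunk, B merges it one by one
        have hsplit := toolRunA_split rest
        have hrest'_sub : (toolRunA rest).2.Sublist (m :: rest) := by
          conv => rhs; rw [hsplit]
          exact ((List.sublist_append_right _ _).trans (List.sublist_cons_self m _))
        have hrest'_len : (toolRunA rest).2.length ≤ n :=
          Nat.le_trans (toolRunA_snd_le rest) hrest_le
        have hA := ih _ hrest'_len (preOf _ hrest'_sub)
        have hfold : (toolRunA rest).2.foldr altStep [] = [] ∨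
            ∃ x s t, (toolRunA rest).2.foldr altStep [] = (x :: s) :: t ∧
              (pvRole x == "tool") = false := by
          rcases toolRunA_snd_head rest with h0 | ⟨h, t, heq, hnt⟩
          · rw [h0]; exact Or.inl rfl
          · rw [heq]
            have hh := hpre' h (hrest'_sub.mem (by rw [heq]; simp))
            obtain ⟨s, t', heq'⟩ := alt_head h t hh
            exact Or.inr ⟨h, s, t', heq', hnt⟩
        have hB : split_appended_segments_py_alt (m :: rest) =
            (m :: (toolRunA rest).1) :: (toolRunA rest).2.foldr altStep [] := by
          show (m :: rest).foldr altStep [] = _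
          conv => lhs; rw [hsplit, ← List.cons_append]
          exact alt_tool_run (m :: (toolRunA rest).1) (toolRunA rest).2
            (fun x hx => by
              rcases (by simpa using hx : x = m ∨ x ∈ (toolRunA rest).1) with h | h
              · subst h; exact beq_iff_eq.mp htool
              · exact toolRunA_fst_tool rest x h)
            (by simp) hfold
        rw [split_appended_segments_py]
        simp only [htool, if_true, hB, hA]
        rfl
      · -- user/system case: both prepend a singleton
        have hus : pvRole m = "user" ∨ pvRole m = "system" := by
          rcases Bool.or_eq_true .. |>.mp hm with h | h
          · rcases Bool.or_eq_true .. |>.mp h with h' | h'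
            · exact absurd h' htool
            · exact Or.inl (beq_iff_eq.mp h')
          · exact Or.inr (beq_iff_eq.mp h)
        have hus' : (pvRole m == "user" || pvRole m == "system") = true := by
          rcases hus with h | h <;> simp [h]
        have hA := ih rest hrest_le (preOf rest (List.sublist_cons_self m rest))
        rw [split_appended_segments_py]
        simp only [htool, Bool.false_eq_true, if_false, hus', if_true, hA]
        show _ = (m :: rest).foldr altStep []
        rw [List.foldr_cons, altStep_us m _ hus]
        rfl

-- ===== VERDICT (by name: the statement is the Claim_ definition above) =====
theorem split_appended_segments_py_spec : Claim_equal_split_appended_segments_py := by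
  intro ms _ hpre
  unfold Spec_split_appended_segments_py
  exact main_equiv ms.length ms (Nat.le_refl _) hpre
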